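-- pv_equiv track=rewrite | github.com/IhsanE/ProjectEulerSolutions | Euler_58.py | ur
-- ===== SOURCE A (Python) =====
-- def ur(n):
--     index2=0
--     cc2=2
--     counterCount2=10;
--     d2=[]
--     while(index2<n**2):
--         d2.append(index2+1)
--         index2=cc2
--         cc2+=counterCount2
--         counterCount2+=8
--     return (d2)
-- ===== SOURCE B (Python) =====
-- def ur(n):
--     t = n ** 2
--     count = 0
--     while 4 * count * count - 2 * count < t:
--         count += 1
--     return [4 * k * k - 2 * k + 1 for k in range(count)]
-- ===== Notes on version B (the rewrite author's own statement) =====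
-- stated objective: alternative
-- what changed: A threads three mutually-updated accumulators (index2, cc2, counterCount2) and appends inside the loop; B recognises the closed form t_k = 4k²−2k+1, loops only to count the qualifying indices, and builds the list with a direct index-to-value comprehension over range(count).
import Mathlib
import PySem

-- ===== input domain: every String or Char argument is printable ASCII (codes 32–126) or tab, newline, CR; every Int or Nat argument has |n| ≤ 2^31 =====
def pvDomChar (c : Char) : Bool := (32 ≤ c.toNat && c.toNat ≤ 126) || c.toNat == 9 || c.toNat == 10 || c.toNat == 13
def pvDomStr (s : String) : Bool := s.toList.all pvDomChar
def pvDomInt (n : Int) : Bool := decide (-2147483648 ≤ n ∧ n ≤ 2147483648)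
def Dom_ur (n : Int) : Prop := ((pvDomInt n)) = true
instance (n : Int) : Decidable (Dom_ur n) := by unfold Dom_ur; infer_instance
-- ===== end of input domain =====

-- B replaces A's three threaded accumulators by the closed form 4k²−2k+1: a loop that only
-- counts the qualifying indices, then a comprehension over range(count) (objective: alternative).

-- ===== PORT A =====
-- A's while loop; the extra conjunct 'index2 < cc2' is a totality guard only (it holds on every
-- state reachable from the initial call), the computation is exactly A's.
def urLoop (t index2 cc2 counterCount2 : Int) (d2 : List Int) : List Int :=
  if _h : index2 < t ∧ index2 < cc2 then
    urLoop t cc2 (cc2 + counterCount2) (counterCount2 + 8) (d2 ++ [index2 + 1])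
  else d2
termination_by (t - index2).toNat
decreasing_by omega

def ur (n : Int) : List Int := urLoop (n ^ 2) 0 2 10 []

-- ===== PORT B =====
-- B's count loop; the extra conjunct '0 ≤ c' is a totality guard only (c starts at 0 and grows).
def urCount (t c : Int) : Int :=
  if h : 0 ≤ c ∧ 4 * c * c - 2 * c < t then urCount t (c + 1) else c
termination_by (t - (4 * c * c - 2 * c)).toNat
decreasing_by refine (Int.toNat_lt_toNat ?_).mpr ?_ <;> nlinarith [h.1, h.2]

def ur_alt (n : Int) : List Int :=
  (PySem.List.pyRange 0 (urCount (n ^ 2) 0) 1).map (fun k => 4 * k * k - 2 * k + 1)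

-- ===== PRECONDITION & SPEC =====
def Spec_ur (n : Int) (out : List Int) : Prop := out = ur_alt n
instance (n : Int) (out : List Int) : Decidable (Spec_ur n out) := by unfold Spec_ur; infer_instance

-- ===== CLAIM (what is proved, stated in full; the proofs are below) =====
def Claim_equal_ur : Prop := ∀ (n : Int), Dom_ur n → Spec_ur n (ur n)

-- ===== LEMMAS AND PROOFS =====

-- reference list: the terms 4k²−2k+1 for k = start, start+1, … while 4k*k-2k < t
def refF (t : Int) (k : Nat) : List Int :=
  if 4 * (k : Int) * k - 2 * k < t then
    (4 * (k : Int) * k - 2 * k + 1) :: refF t (k + 1)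
  else []
termination_by (t - (4 * (k : Int) * k - 2 * k)).toNat
decreasing_by
  push_cast
  refine (Int.toNat_lt_toNat ?_).mpr ?_ <;> nlinarith [Int.natCast_nonneg k]

lemma urLoop_eq_ref (t : Int) (k : Nat) (acc : List Int) :
    urLoop t (4 * (k : Int) * k - 2 * k) (4 * ((k : Int) + 1) * (k + 1) - 2 * (k + 1))
      (8 * k + 10) acc = acc ++ refF t k := by
  rw [urLoop, refF]
  by_cases hlt : 4 * (k : Int) * k - 2 * k < t
  · have hcc : (4 * (k : Int) * k - 2 * k) < 4 * ((k : Int) + 1) * (k + 1) - 2 * (k + 1) := by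
      nlinarith [Int.natCast_nonneg k]
    rw [dif_pos ⟨hlt, hcc⟩, if_pos hlt]
    have ih := urLoop_eq_ref t (k + 1) (acc ++ [4 * (k : Int) * k - 2 * k + 1])
    push_cast at ih
    ring_nf at ih ⊢
    simp only [List.append_assoc, List.singleton_append] at ih ⊢
    exact ih
  · rw [dif_neg (by tauto), if_neg hlt, List.append_nil]
termination_by (t - (4 * (k : Int) * k - 2 * k)).toNat
decreasing_by
  push_cast
  refine (Int.toNat_lt_toNat ?_).mpr ?_ <;> nlinarith [Int.natCast_nonneg k]

lemma urCount_ge (t c : Int) : c ≤ urCount t c := by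
  unfold urCount; split
  · have := urCount_ge t (c + 1); omega
  · omega
termination_by (t - (4 * c * c - 2 * c)).toNat
decreasing_by
  rename_i h
  refine (Int.toNat_lt_toNat ?_).mpr ?_ <;> nlinarith [h.1, h.2]

lemma alt_eq_ref (t : Int) (k : Nat) :
    (PySem.List.pyRange (k : Int) (urCount t (k : Int)) 1).map (fun j => 4 * j * j - 2 * j + 1)
      = refF t k := by
  unfold urCount
  rw [refF]
  by_cases hlt : 4 * (k : Int) * k - 2 * k < t
  · rw [dif_pos ⟨Int.natCast_nonneg k, hlt⟩, if_pos hlt]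
    have hge : ((k : Int) + 1) ≤ urCount t ((k : Int) + 1) := urCount_ge t _
    rw [PySem.List.pyRange_one_cons (by omega)]
    have ih := alt_eq_ref t (k + 1)
    push_cast at ih
    simp only [List.map_cons, ih]
  · rw [dif_neg (by tauto), if_neg hlt]
    simp
termination_by (t - (4 * (k : Int) * k - 2 * k)).toNat
decreasing_by
  push_cast
  refine (Int.toNat_lt_toNat ?_).mpr ?_ <;> nlinarith [Int.natCast_nonneg k]

-- ===== VERDICT (by name: the statement is the Claim_ definition above) =====
theorem ur_spec : Claim_equal_ur := by
  intro n _
  unfold Spec_ur ur ur_alt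
  have h1 := urLoop_eq_ref (n ^ 2) 0 []
  have h2 := alt_eq_ref (n ^ 2) 0
  norm_num at h1 h2
  rw [h1, ← h2]
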